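-- pv_equiv track=rewrite | github.com/xjohnnygx/Zup | server/app/api/security/encryption.py | unHash
-- ===== SOURCE A (Python) =====
-- def unHash(hash: str) -> str:
--     inverted: str = ""
--     result: str = ""
--     i: int = 2
--     while i < len(hash):
--         inverted += hash[i]
--         i += 3
--     for x in inverted:
--         result = x + result
--     return result
-- ===== SOURCE B (Python) =====
-- def unHash(hash: str) -> str:
--     out = []
--     for i in reversed(range(2, len(hash), 3)):
--         out.append(hash[i])
--     return "".join(out)
-- ===== Notes on version B (the rewrite author's own statement) =====
-- stated objective: faster
-- what changed: Fuses A's two passes (extract every 3rd char, then reverse by repeated string prepending) into one backward pass over reversed(range(2, len(hash), 3)) that appends to a list and joins once, eliminating A's quadratic string concatenation.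
import Mathlib
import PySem

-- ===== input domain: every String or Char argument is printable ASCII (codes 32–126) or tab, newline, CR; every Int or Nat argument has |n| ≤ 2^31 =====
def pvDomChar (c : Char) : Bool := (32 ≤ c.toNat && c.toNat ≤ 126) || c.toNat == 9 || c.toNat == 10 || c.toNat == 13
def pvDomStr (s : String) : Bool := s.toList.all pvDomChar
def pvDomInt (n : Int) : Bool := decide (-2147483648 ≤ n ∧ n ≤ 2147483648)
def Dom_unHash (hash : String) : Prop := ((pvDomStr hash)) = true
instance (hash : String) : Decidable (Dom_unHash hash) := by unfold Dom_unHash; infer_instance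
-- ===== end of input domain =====

-- B fuses A's two passes into one backward pass over the selected indices, replacing A's repeated string prepending (objective: faster, measured).

-- ===== PORT A =====
-- while i < len(hash): inverted += hash[i]; i += 3   (i starts at 2; index always in range, so pyGetD's default is never used)
def unHashWhile (s : List Char) (i : Nat) : List Char :=
  if _h : i < s.length then
    PySem.List.pyGetD s (i : Int) ' ' :: unHashWhile s (i + 3)
  else []
termination_by s.length - i

def unHash (hash : String) : String :=
  let inverted : List Char := unHashWhile hash.toList 2
  -- for x in inverted: result = x + result
  let result : List Char := inverted.foldl (fun result x => x :: result) []
  String.mk result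

-- ===== PORT B =====
-- for i in reversed(range(2, len(hash), 3)): out.append(hash[i])  (index always in range, so pyGetD's default is never used)
def unHash_alt (hash : String) : String :=
  let out : List Char :=
    ((PySem.List.pyRange 2 (hash.toList.length : Int) 3).reverse).foldl
      (fun out i => out ++ [PySem.List.pyGetD hash.toList i ' ']) []
  String.mk out

-- ===== PRECONDITION & SPEC =====
def Spec_unHash (hash : String) (out : String) : Prop := out = unHash_alt hash
instance (hash : String) (out : String) : Decidable (Spec_unHash hash out) := by unfold Spec_unHash; infer_instance

-- ===== CLAIM (what is proved, stated in full; the proofs are below) =====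
def Claim_equal_unHash : Prop := ∀ (hash : String), Dom_unHash hash → Spec_unHash hash (unHash hash)

-- ===== LEMMAS AND PROOFS =====

-- step-3 range: empty / cons characterisations
lemma pyRange_three_nil (a b : Int) (h : b ≤ a) : PySem.List.pyRange a b 3 = [] := by
  rw [PySem.List.pyRange_of_pos a b (by norm_num)]
  simp [not_lt.mpr h]

lemma pyRange_three_cons (a b : Int) (h : a < b) :
    PySem.List.pyRange a b 3 = a :: PySem.List.pyRange (a + 3) b 3 := by
  rw [PySem.List.pyRange_of_pos a b (by norm_num), PySem.List.pyRange_of_pos (a + 3) b (by norm_num)]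
  have hcount : (if a < b then ((b - a + 3 - 1) / 3).toNat else 0)
      = (if a + 3 < b then ((b - (a + 3) + 3 - 1) / 3).toNat else 0) + 1 := by
    rw [if_pos h]
    by_cases h3 : a + 3 < b
    · rw [if_pos h3]
      have : b - a + 3 - 1 = (b - (a + 3) + 3 - 1) + 1 * 3 := by ring
      rw [this, Int.add_mul_ediv_right _ _ (by norm_num)]
      have hnum : 0 ≤ b - (a + 3) + 3 - 1 := by omega
      have := Int.ediv_nonneg hnum (by norm_num : (0:Int) ≤ 3)
      omega
    · rw [if_neg h3]
      have h1 : 1 ≤ b - a := by omega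
      have h2 : b - a ≤ 3 := by omega
      have : (b - a + 3 - 1) / 3 = 1 := by omega
      simp [this]
  rw [hcount, List.range_succ_eq_map]
  simp [List.map_map, Function.comp]
  intro k _
  ring

-- A's while-loop produces exactly the map of B's index range
lemma unHashWhile_eq (s : List Char) (i : Nat) :
    unHashWhile s i
      = (PySem.List.pyRange (i : Int) (s.length : Int) 3).map
          (fun j => PySem.List.pyGetD s j ' ') := by
  by_cases h : i < s.length
  · rw [unHashWhile, dif_pos h, pyRange_three_cons _ _ (by exact_mod_cast h), List.map_cons]
    have : ((i : Int) + 3) = ((i + 3 : Nat) : Int) := by push_cast; ring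
    rw [this, unHashWhile_eq s (i + 3)]
  · rw [unHashWhile, dif_neg h, pyRange_three_nil _ _ (by exact_mod_cast not_lt.mp h)]
    simp
termination_by s.length - i

-- foldl with cons reverses; foldl with append-singleton maps.
lemma foldl_cons_rev {α : Type} (l acc : List α) :
    l.foldl (fun r x => x :: r) acc = l.reverse ++ acc := by
  induction l generalizing acc with
  | nil => simp
  | cons x xs ih => simp [List.foldl_cons, ih]

lemma foldl_append_map {α β : Type} (f : α → β) (l : List α) (acc : List β) :
    l.foldl (fun out i => out ++ [f i]) acc = acc ++ l.map f := by
  induction l generalizing acc with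
  | nil => simp
  | cons x xs ih => simp [List.foldl_cons, ih]

-- ===== VERDICT (by name: the statement is the Claim_ definition above) =====
theorem unHash_spec : Claim_equal_unHash := by
  intro hash _
  unfold Spec_unHash unHash unHash_alt
  simp only [foldl_append_map, foldl_cons_rev, unHashWhile_eq,
    List.nil_append, List.append_nil]
  norm_num [List.map_reverse]
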